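-- pv_equiv track=rewrite | github.com/Minoo7/TDDE24 | tenta/2020_01_17_(08)/code.py | distribute_r
-- ===== SOURCE A (Python) =====
-- def distribute_r(num, seq):
--     """Recursive function to divide elements in a list"""
--     if not seq:
--         return []
--     def inner(first, inner_seq):
--         if not inner_seq:
--             return []
--         if inner_seq[num:]:
--             return [[inner_seq[0]] + inner(False, inner_seq[num:])]
--         elif not first:
--             return [inner_seq[0]]
--         return []
--     return inner(True, seq) + distribute_r(num, seq[1:])
-- ===== SOURCE B (Python) =====
-- def distribute_r(num, seq):
--     """Pair each element with the element num places later."""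
--     return [[a, b] for a, b in zip(seq, seq[num:])]
-- ===== Notes on version B (the rewrite author's own statement) =====
-- stated objective: simpler
-- what changed: Replaces A's double recursion (outer recursion over suffixes plus an inner recursion striding by num) with a single zip of the list against its num-shifted suffix, mapped to pairs.
-- outside the precondition, e.g. on distribute_r(2, [1, 2, 3, 4, 5]): A returns [[1, [3, 5]], [2, 4], [3, 5]], B returns [[1, 3], [2, 4], [3, 5]]
import Mathlib
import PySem

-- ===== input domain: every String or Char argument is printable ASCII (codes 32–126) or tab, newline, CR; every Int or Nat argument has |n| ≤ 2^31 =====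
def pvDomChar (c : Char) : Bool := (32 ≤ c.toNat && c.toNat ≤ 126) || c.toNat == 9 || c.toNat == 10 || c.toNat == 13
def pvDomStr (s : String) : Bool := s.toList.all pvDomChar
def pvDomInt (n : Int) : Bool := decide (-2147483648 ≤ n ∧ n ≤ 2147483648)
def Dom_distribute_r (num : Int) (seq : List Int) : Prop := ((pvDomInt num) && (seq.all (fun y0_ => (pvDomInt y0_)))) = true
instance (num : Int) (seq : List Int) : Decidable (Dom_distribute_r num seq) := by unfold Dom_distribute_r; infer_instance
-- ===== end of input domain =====

-- B replaces A's double recursion by a single zip with the num-shifted suffix (simpler, one pass).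


-- ===== PORT A =====
-- A's inner helper returns Python lists whose elements are ints or nested lists, so its
-- value is carried by the inductive NL (a Python list of ints/lists), decoded only at the
-- top-level boundary to fit the required List (List Int) signature.
inductive NL where
  | nil : NL
  | consI : Int → NL → NL        -- an int element followed by the rest of the list
  | consL : NL → NL → NL         -- a list element followed by the rest of the list
deriving DecidableEq, Repr

-- Python list concatenation '+' on NL values
def nlAppend : NL → NL → NL
  | .nil, b => b
  | .consI x r, b => .consI x (nlAppend r b)
  | .consL x r, b => .consL x (nlAppend r b)

-- A's 'inner(first, inner_seq)'; fuel is a totality guard only (A diverges for num ≤ 0;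
-- fuel ≥ inner_seq.length never runs out when num ≥ 1)
def innerA (num : Int) : Nat → Bool → List Int → NL
  | 0, _, _ => .nil
  | _fuel + 1, _, [] => .nil
  | fuel + 1, first, x :: t =>
      let rest := PySem.List.slice (x :: t) (some num) none   -- inner_seq[num:]
      if rest ≠ [] then
        .consL (.consI x (innerA num fuel false rest)) .nil
      else if first = false then
        .consI x .nil
      else
        .nil

-- A's outer recursion: inner(True, seq) + distribute_r(num, seq[1:])
def distA (num : Int) : List Int → NL
  | [] => .nil
  | x :: t => nlAppend (innerA num (x :: t).length true (x :: t)) (distA num t)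

-- boundary decode of the returned Python value into List (List Int)
-- (inside Pre_ every top-level element is a list of ints; the other branches keep it total)
def nlToInts : NL → List Int
  | .nil => []
  | .consI i r => i :: nlToInts r
  | .consL _ r => nlToInts r

def nlToLists : NL → List (List Int)
  | .nil => []
  | .consL x r => nlToInts x :: nlToLists r
  | .consI i r => [i] :: nlToLists r

def distribute_r (num : Int) (seq : List Int) : List (List Int) :=
  nlToLists (distA num seq)

-- ===== PORT B =====
-- [[a, b] for a, b in zip(seq, seq[num:])]
def distribute_r_alt (num : Int) (seq : List Int) : List (List Int) :=
  (seq.zip (PySem.List.slice seq (some num) none)).map (fun p => [p.1, p.2])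

-- ===== PRECONDITION & SPEC =====
-- Pre_ excludes (a) num ≤ 0 with nonempty seq, where A raises RecursionError, and
-- (b) num ≥ 1 with len(seq) > 2*num, where A returns NESTED lists (e.g. [1, [3, 5]]),
-- which are not values of the declared type list[list[int]] and cannot be represented.
def Pre_distribute_r (num : Int) (seq : List Int) : Prop :=
  seq = [] ∨ (1 ≤ num ∧ (seq.length : Int) ≤ 2 * num)
instance (num : Int) (seq : List Int) : Decidable (Pre_distribute_r num seq) := by
  unfold Pre_distribute_r; infer_instance

def pvWitness_distribute_r : Int × List Int := (2, [1, 2, 3, 4])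

def Spec_distribute_r (num : Int) (seq : List Int) (out : List (List Int)) : Prop := out = distribute_r_alt num seq
instance (num : Int) (seq : List Int) (out : List (List Int)) : Decidable (Spec_distribute_r num seq out) := by unfold Spec_distribute_r; infer_instance

-- ===== CLAIM (what is proved, stated in full; the proofs are below) =====
def Claim_equal_distribute_r : Prop := ∀ (num : Int) (seq : List Int), Dom_distribute_r num seq → Pre_distribute_r num seq → Spec_distribute_r num seq (distribute_r num seq)

-- ===== LEMMAS AND PROOFS =====

theorem nlToLists_append (a b : NL) :
    nlToLists (nlAppend a b) = nlToLists a ++ nlToLists b := by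
  induction a with
  | nil => rfl
  | consI i r ih => simp [nlAppend, nlToLists, ih]
  | consL x r ih ih2 => simp [nlAppend, nlToLists, ih2]

theorem distA_eq (m : Nat) (hm : 1 ≤ m) :
    ∀ seq : List Int, seq.length ≤ 2 * m →
      nlToLists (distA (m : Int) seq) =
        (seq.zip (seq.drop m)).map (fun p => [p.1, p.2])
  | [], _ => by simp [distA, nlToLists]
  | x :: t, h => by
      obtain ⟨k, rfl⟩ : ∃ k, m = k + 1 := ⟨m - 1, by omega⟩
      have ih := distA_eq (k + 1) hm t (by simp at h ⊢; omega)
      have hs : PySem.List.slice (x :: t) (some ((k + 1 : Nat) : Int)) none = t.drop k := by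
        rw [PySem.List.slice_from_natCast]
        exact List.drop_succ_cons
      push_cast at ih hs ⊢
      cases hc : t.drop k with
      | nil =>
          have hlt : t.length ≤ k := List.drop_eq_nil_iff.mp hc
          have hdt : t.drop (k + 1) = [] := List.drop_eq_nil_of_le (by omega)
          rw [hc] at hs
          rw [distA, nlToLists_append]
          have hinner : innerA ((k : Int) + 1) (x :: t).length true (x :: t) = .nil := by
            simp [innerA, hs]
          rw [hinner]
          simp [nlToLists, ih, List.drop_succ_cons, hc, hdt]
      | cons y r =>
          have ht : t ≠ [] := by
            intro he; rw [he] at hc; simp at hc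
          have hlen : (y :: r).length = t.length - k := by
            rw [← hc, List.length_drop]
          have hdyr : (y :: r).drop (k + 1) = [] := by
            apply List.drop_eq_nil_of_le
            simp at h
            omega
          have hs2 : PySem.List.slice (y :: r) (some ((k + 1 : Nat) : Int)) none = [] := by
            rw [PySem.List.slice_from_natCast]
            exact hdyr
          push_cast at hs2
          have hdt : t.drop (k + 1) = r := by
            have := List.drop_drop (l := t) (i := 1) (j := k)
            rw [hc] at this
            simpa using this.symm
          obtain ⟨w, hw⟩ : ∃ w, t.length = w + 1 := ⟨t.length - 1, by
            cases t with | nil => exact absurd rfl ht | cons a b => simp⟩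
          rw [hc] at hs
          have h1 : innerA ((k : Int) + 1) t.length false (y :: r) = .consI y .nil := by
            rw [hw]
            simp [innerA, hs2]
          have hinner : innerA ((k : Int) + 1) (x :: t).length true (x :: t)
              = .consL (.consI x (.consI y .nil)) .nil := by
            simp only [List.length_cons]
            simp [innerA, hs, h1]
          rw [distA, nlToLists_append, hinner]
          simp [nlToLists, nlToInts, ih, List.drop_succ_cons, hc, hdt]

theorem distribute_r_spec' (num : Int) (seq : List Int)
    (h : Pre_distribute_r num seq) : distribute_r num seq = distribute_r_alt num seq := by
  rcases h with h | ⟨h1, h2⟩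
  · subst h; rfl
  · have hm : num = ((num.toNat : Nat) : Int) := by omega
    rw [distribute_r, distribute_r_alt, hm, PySem.List.slice_from_natCast]
    exact distA_eq num.toNat (by omega) seq (by omega)

-- ===== VERDICT (by name: the statement is the Claim_ definition above) =====
theorem distribute_r_spec : Claim_equal_distribute_r := by
  intro num seq _ hpre
  exact distribute_r_spec' num seq hpre
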